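-- pv_equiv track=rewrite | github.com/ahmedyarub/algorithms | Intro/016_areSimilar.py | solution
-- ===== SOURCE A (Python) =====
-- def solution(a, b):
--     differences = 0
--     dif_index = -1
--
--     for i in range(len(a)):
--         if a[i] != b[i]:
--             if differences > 1:
--                 return False
--             if differences == 1:
--                 if a[dif_index] != b[i] or b[dif_index] != a[i]:
--                     return False
--                 else:
--                     differences = 2
--             else:
--                 differences = 1
--                 dif_index = i
--     return True
-- ===== SOURCE B (Python) =====
-- def solution(a, b):
--     n = len(a)
--     i = 0
--     while i < n and a[i] == b[i]:
--         i += 1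
--     if i == n:
--         return True
--     j = n - 1
--     while a[j] == b[j]:
--         j -= 1
--     c = a[:]
--     c[i], c[j] = c[j], c[i]
--     return all(c[k] == b[k] for k in range(n))
-- ===== Notes on version B (the rewrite author's own statement) =====
-- stated objective: alternative
-- what changed: Replaces A's per-index state machine (mismatch counter plus remembered index, early returns) by the classic swap-and-compare algorithm: two-pointer scans find the first and last mismatching positions, a copy of a gets those two entries swapped, and the answer is whether the swapped copy matches b.
-- intended difference: On inputs with exactly one differing position i < len(a), A returns True (its counter treats a single mismatch as similar) while B returns False, which is intended: no single swap can make the arrays equal when exactly one position differs. — e.g. on solution([1, 2], [1, 3]): A returns true, B returns false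
-- outside the precondition, e.g. on solution([1, 2, 3], [0, 5]): A returns False, B raises IndexError
import Mathlib
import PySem

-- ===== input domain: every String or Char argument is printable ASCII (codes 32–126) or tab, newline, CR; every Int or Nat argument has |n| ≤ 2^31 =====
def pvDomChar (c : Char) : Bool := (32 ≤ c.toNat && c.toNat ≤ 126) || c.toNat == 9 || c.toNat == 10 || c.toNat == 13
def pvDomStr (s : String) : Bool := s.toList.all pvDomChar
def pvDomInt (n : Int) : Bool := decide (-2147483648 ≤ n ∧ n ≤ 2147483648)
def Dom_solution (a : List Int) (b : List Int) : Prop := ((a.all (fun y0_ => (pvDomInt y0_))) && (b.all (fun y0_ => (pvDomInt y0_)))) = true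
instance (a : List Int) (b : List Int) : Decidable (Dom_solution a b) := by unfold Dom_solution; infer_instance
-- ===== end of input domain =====

-- B replaces A's mismatch-counting state machine by the classic swap-and-compare algorithm
-- (find first/last mismatch, swap in a copy, compare); they agree on Pre_ outside D_ (one mismatch).

-- ===== PORT A =====
-- A's loop: state (differences, dif_index), one step per index i of range(len(a)).
def solutionGo (a : List Int) (b : List Int) (i : Nat) (differences : Int) (difIndex : Int) : Bool :=
  if _h : i < a.length then
    if ((PySem.List.pyGet? a (i : Int)).getD 0 != (PySem.List.pyGet? b (i : Int)).getD 0) then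
      if differences > 1 then false
      else if differences = 1 then
        if (((PySem.List.pyGet? a difIndex).getD 0 != (PySem.List.pyGet? b (i : Int)).getD 0) ||
            ((PySem.List.pyGet? b difIndex).getD 0 != (PySem.List.pyGet? a (i : Int)).getD 0)) then false
        else solutionGo a b (i + 1) 2 difIndex
      else solutionGo a b (i + 1) 1 (i : Int)
    else solutionGo a b (i + 1) differences difIndex
  else true
termination_by a.length - i

def solution (a : List Int) (b : List Int) : Bool :=
  solutionGo a b 0 0 (-1)

-- ===== PORT B =====
-- while i < n and a[i] == b[i]: i += 1
def firstMis (a b : List Int) (n : Nat) (i : Nat) : Nat :=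
  if _h : i < n then
    if ((PySem.List.pyGet? a (i : Int)).getD 0 == (PySem.List.pyGet? b (i : Int)).getD 0) then
      firstMis a b n (i + 1)
    else i
  else n
termination_by n - i

-- while a[j] == b[j]: j -= 1   (the 'j = 0' guard is only a totality fuel: in B this loop
-- is entered only when a mismatch at some index ≤ j exists, so the guard is never taken)
def lastMis (a b : List Int) (j : Nat) : Nat :=
  if ((PySem.List.pyGet? a (j : Int)).getD 0 == (PySem.List.pyGet? b (j : Int)).getD 0) then
    if j = 0 then 0 else lastMis a b (j - 1)
  else j
termination_by j

def solution_alt (a : List Int) (b : List Int) : Bool :=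
  let n := a.length
  let i := firstMis a b n 0
  if i = n then true
  else
    let j := lastMis a b (n - 1)
    let ci := (PySem.List.pyGet? a (j : Int)).getD 0
    let cj := (PySem.List.pyGet? a (i : Int)).getD 0
    let c := (a.set i ci).set j cj
    (List.range n).all (fun k =>
      ((PySem.List.pyGet? c (k : Int)).getD 0 == (PySem.List.pyGet? b (k : Int)).getD 0))

-- ===== PRECONDITION & SPEC =====
-- Pre_ excludes len(a) > len(b): there Python A hits b[i] and raises IndexError, or returns
-- False early while B's scans still raise IndexError, so no common return value exists.
def Pre_solution (a : List Int) (b : List Int) : Prop := a.length ≤ b.length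
instance (a : List Int) (b : List Int) : Decidable (Pre_solution a b) := by
  unfold Pre_solution; infer_instance
def pvWitness_solution : List Int × List Int := ([1, 2, 3], [1, 3, 2])

-- On inputs with exactly one differing position, A returns True (its counter treats a single
-- mismatch as similar) while B returns False, which is intended: no single swap can make the
-- arrays equal when exactly one position differs.
def D_solution (a : List Int) (b : List Int) : Prop :=
  ((a.zip b).countP (fun p => p.1 != p.2)) = 1
instance (a : List Int) (b : List Int) : Decidable (D_solution a b) := by
  unfold D_solution; infer_instance

def Spec_solution (a : List Int) (b : List Int) (out : Bool) : Prop := ¬ D_solution a b → out = solution_alt a b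
instance (a : List Int) (b : List Int) (out : Bool) : Decidable (Spec_solution a b out) := by unfold Spec_solution; infer_instance

def pvDiffWitness_solution : List Int × List Int := ([1, 2], [1, 3])
def pvDiffWitnessOut_solution : Bool × Bool := (true, false)

-- ===== CLAIM (what is proved, stated in full; the proofs are below) =====
def Claim_unchanged_solution : Prop := ∀ (a : List Int) (b : List Int), Dom_solution a b → Pre_solution a b → Spec_solution a b (solution a b)
def Claim_changed_solution : Prop := Dom_solution (pvDiffWitness_solution.1) (pvDiffWitness_solution.2) ∧ Pre_solution (pvDiffWitness_solution.1) (pvDiffWitness_solution.2) ∧ D_solution (pvDiffWitness_solution.1) (pvDiffWitness_solution.2) ∧ solution (pvDiffWitness_solution.1) (pvDiffWitness_solution.2) = pvDiffWitnessOut_solution.1 ∧ solution_alt (pvDiffWitness_solution.1) (pvDiffWitness_solution.2) = pvDiffWitnessOut_solution.2 ∧ pvDiffWitnessOut_solution.1 ≠ pvDiffWitnessOut_solution.2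
def Claim_exact_solution : Prop := ∀ (a : List Int) (b : List Int), Dom_solution a b → Pre_solution a b → D_solution a b → solution a b ≠ solution_alt a b

-- ===== LEMMAS AND PROOFS =====

-- the shared mismatch test at index i
def pdiff (a b : List Int) (i : Nat) : Bool :=
  ((PySem.List.pyGet? a (i : Int)).getD 0 != (PySem.List.pyGet? b (i : Int)).getD 0)

theorem pdiff_eq (a b : List Int) (i : Nat) :
    pdiff a b i = !((PySem.List.pyGet? a (i : Int)).getD 0 == (PySem.List.pyGet? b (i : Int)).getD 0) := rfl

theorem pdiff_of_not_beq (a b : List Int) (i : Nat)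
    (h : ¬ ((PySem.List.pyGet? a (i : Int)).getD 0 == (PySem.List.pyGet? b (i : Int)).getD 0) = true) :
    pdiff a b i = true := by
  cases hb : ((PySem.List.pyGet? a (i : Int)).getD 0 == (PySem.List.pyGet? b (i : Int)).getD 0) with
  | false => rw [pdiff_eq, hb]; rfl
  | true => exact absurd hb h

theorem not_pdiff_of_beq (a b : List Int) (i : Nat)
    (h : ((PySem.List.pyGet? a (i : Int)).getD 0 == (PySem.List.pyGet? b (i : Int)).getD 0) = true) :
    ¬ pdiff a b i = true := by
  rw [pdiff_eq, h]
  simp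

theorem beq_false_of_pdiff (a b : List Int) (i : Nat) (h : pdiff a b i = true) :
    ((PySem.List.pyGet? a (i : Int)).getD 0 == (PySem.List.pyGet? b (i : Int)).getD 0) = false := by
  cases hb : ((PySem.List.pyGet? a (i : Int)).getD 0 == (PySem.List.pyGet? b (i : Int)).getD 0) with
  | false => rfl
  | true => rw [pdiff_eq, hb] at h; exact absurd h (by simp)

-- the swap cross-check that characterises A's two-difference case
def cross (a b : List Int) (i j : Nat) : Bool :=
  ((PySem.List.pyGet? a (i : Int)).getD 0 == (PySem.List.pyGet? b (j : Int)).getD 0) &&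
  ((PySem.List.pyGet? a (j : Int)).getD 0 == (PySem.List.pyGet? b (i : Int)).getD 0)

-- A's classification of the list of differing indices
def classify (a b : List Int) (l : List Nat) : Bool :=
  match l with
  | [] => true
  | [_] => true
  | [i, j] => cross a b i j
  | _ => false

-- the differing indices from position i on
def rest (a b : List Int) (i : Nat) : List Nat :=
  (List.range' i (a.length - i)).filter (pdiff a b)

theorem rest_stop (a b : List Int) (i : Nat) (h : ¬ i < a.length) : rest a b i = [] := by
  unfold rest
  have : a.length - i = 0 := by omega
  simp [this]

theorem rest_step_pos (a b : List Int) (i : Nat) (h : i < a.length)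
    (hp : pdiff a b i = true) : rest a b i = i :: rest a b (i + 1) := by
  unfold rest
  have : a.length - i = (a.length - (i + 1)) + 1 := by omega
  rw [this, List.range'_succ, List.filter_cons_of_pos hp]

theorem rest_step_neg (a b : List Int) (i : Nat) (h : i < a.length)
    (hp : ¬ pdiff a b i = true) : rest a b i = rest a b (i + 1) := by
  unfold rest
  have : a.length - i = (a.length - (i + 1)) + 1 := by omega
  rw [this, List.range'_succ, List.filter_cons_of_neg hp]

theorem beq_int_comm (x y : Int) : (x == y) = (y == x) := by
  by_cases h : x = y
  · simp [h]
  · have h' : ¬ y = x := fun hh => h hh.symm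
    simp [h, h']

-- A's "a[dif_index] != b[i] or b[dif_index] != a[i]" is the negation of the cross check
theorem notcross (a b : List Int) (i j : Nat) :
    (((PySem.List.pyGet? a (i : Int)).getD 0 != (PySem.List.pyGet? b (j : Int)).getD 0) ||
     ((PySem.List.pyGet? b (i : Int)).getD 0 != (PySem.List.pyGet? a (j : Int)).getD 0))
    = !(cross a b i j) := by
  unfold cross
  simp only [bne]
  rw [beq_int_comm ((PySem.List.pyGet? b (i : Int)).getD 0)]
  cases h1 : ((PySem.List.pyGet? a (i : Int)).getD 0 == (PySem.List.pyGet? b (j : Int)).getD 0) <;>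
    cases h2 : ((PySem.List.pyGet? a (j : Int)).getD 0 == (PySem.List.pyGet? b (i : Int)).getD 0) <;>
    simp

-- state differences = 2: any further difference means False
theorem go_two (a b : List Int) (i : Nat) (d : Int) :
    solutionGo a b i 2 d = (rest a b i).isEmpty := by
  by_cases h : i < a.length
  · rw [solutionGo, dif_pos h]
    by_cases hp : ((PySem.List.pyGet? a (i : Int)).getD 0 != (PySem.List.pyGet? b (i : Int)).getD 0) = true
    · rw [rest_step_pos a b i h (show pdiff a b i = true from hp), if_pos hp, if_pos (by norm_num : (2:Int) > 1)]
      simp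
    · rw [rest_step_neg a b i h (show ¬ pdiff a b i = true from hp), if_neg hp]
      exact go_two a b (i + 1) d
  · rw [solutionGo, dif_neg h, rest_stop a b i h]
    rfl
termination_by a.length - i

set_option maxRecDepth 4000 in
-- state differences = 1 with first difference at i0
theorem go_one (a b : List Int) (i : Nat) (i0 : Nat) :
    solutionGo a b i 1 (i0 : Int) =
      (match rest a b i with
       | [] => true
       | [j] => cross a b i0 j
       | _ => false) := by
  by_cases h : i < a.length
  · rw [solutionGo, dif_pos h]
    by_cases hp : ((PySem.List.pyGet? a (i : Int)).getD 0 != (PySem.List.pyGet? b (i : Int)).getD 0) = true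
    · rw [rest_step_pos a b i h (show pdiff a b i = true from hp), if_pos hp, if_neg (by norm_num : ¬ ((1:Int) > 1)),
        if_pos (rfl : (1:Int) = 1), notcross a b i0 i, go_two a b (i + 1) ((i0 : Nat) : Int)]
      cases hr : rest a b (i + 1) with
      | nil => cases hc : cross a b i0 i <;> simp [hc]
      | cons y ys => cases hc : cross a b i0 i <;> simp
    · rw [rest_step_neg a b i h (show ¬ pdiff a b i = true from hp), if_neg hp]
      exact go_one a b (i + 1) i0
  · rw [solutionGo, dif_neg h, rest_stop a b i h]
termination_by a.length - i

-- state differences = 0: the result is the classification of the remaining differences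
theorem go_zero (a b : List Int) (i : Nat) (d : Int) :
    solutionGo a b i 0 d = classify a b (rest a b i) := by
  by_cases h : i < a.length
  · rw [solutionGo, dif_pos h]
    by_cases hp : ((PySem.List.pyGet? a (i : Int)).getD 0 != (PySem.List.pyGet? b (i : Int)).getD 0) = true
    · rw [rest_step_pos a b i h (show pdiff a b i = true from hp), if_pos hp, if_neg (by norm_num : ¬ ((0:Int) > 1)),
        if_neg (by norm_num : ¬ ((0:Int) = 1)), go_one a b (i + 1) i]
      cases hr : rest a b (i + 1) with
      | nil => simp [classify]
      | cons y ys => cases ys <;> simp [classify]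
    · rw [rest_step_neg a b i h (show ¬ pdiff a b i = true from hp), if_neg hp]
      exact go_zero a b (i + 1) d
  · rw [solutionGo, dif_neg h, rest_stop a b i h]
    rfl
termination_by a.length - i

theorem rest_zero (a b : List Int) :
    rest a b 0 = (List.range a.length).filter (pdiff a b) := by
  unfold rest
  rw [Nat.sub_zero, ← List.range_eq_range']

theorem solution_eq_classify (a b : List Int) :
    solution a b = classify a b ((List.range a.length).filter (pdiff a b)) := by
  unfold solution
  rw [go_zero a b 0 (-1), rest_zero]

-- B-side: the first-mismatch scan finds the head of the remaining differences
theorem firstMis_spec (a b : List Int) (i : Nat) :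
    firstMis a b a.length i =
      (match rest a b i with | [] => a.length | k :: _ => k) := by
  by_cases h : i < a.length
  · rw [firstMis, dif_pos h]
    by_cases hp : ((PySem.List.pyGet? a (i : Int)).getD 0 == (PySem.List.pyGet? b (i : Int)).getD 0) = true
    · rw [rest_step_neg a b i h (not_pdiff_of_beq a b i hp), if_pos hp]
      exact firstMis_spec a b (i + 1)
    · rw [rest_step_pos a b i h (pdiff_of_not_beq a b i hp), if_neg hp]
  · rw [firstMis, dif_neg h, rest_stop a b i h]
termination_by a.length - i

-- B-side: the downward scan finds the last difference at index ≤ j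
theorem lastMis_spec (a b : List Int) (j : Nat) :
    lastMis a b j = (((List.range (j + 1)).filter (pdiff a b)).getLast?).getD 0 := by
  induction j with
  | zero =>
    rw [lastMis]
    by_cases hp : ((PySem.List.pyGet? a ((0:Nat) : Int)).getD 0 == (PySem.List.pyGet? b ((0:Nat) : Int)).getD 0) = true
    · rw [if_pos hp, List.range_one, List.filter_cons_of_neg (not_pdiff_of_beq a b 0 hp)]
      rfl
    · rw [if_neg hp, List.range_one, List.filter_cons_of_pos (pdiff_of_not_beq a b 0 hp)]
      rfl
  | succ j ih =>
    rw [lastMis, List.range_succ, List.filter_append]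
    by_cases hp : ((PySem.List.pyGet? a ((j+1:Nat) : Int)).getD 0 == (PySem.List.pyGet? b ((j+1:Nat) : Int)).getD 0) = true
    · rw [if_pos hp, if_neg (Nat.succ_ne_zero j), Nat.add_sub_cancel, ih,
        List.filter_cons_of_neg (not_pdiff_of_beq a b (j+1) hp)]
      simp
    · rw [if_neg hp, List.filter_cons_of_pos (pdiff_of_not_beq a b (j+1) hp)]
      simp

-- sortedness of the list of differing indices
theorem L_pairwise (a b : List Int) :
    ((List.range a.length).filter (pdiff a b)).Pairwise (· < ·) :=
  List.Pairwise.sublist List.filter_sublist List.pairwise_lt_range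

theorem L_mem_lt (a b : List Int) (k : Nat)
    (h : k ∈ (List.range a.length).filter (pdiff a b)) : k < a.length := by
  have := (List.mem_filter.mp h).1
  exact List.mem_range.mp this

theorem L_mem_diff (a b : List Int) (k : Nat)
    (h : k ∈ (List.range a.length).filter (pdiff a b)) : pdiff a b k = true :=
  (List.mem_filter.mp h).2

theorem not_mem_L (a b : List Int) (k : Nat) (hk : k < a.length)
    (h : k ∉ (List.range a.length).filter (pdiff a b)) :
    ((PySem.List.pyGet? a (k : Int)).getD 0 == (PySem.List.pyGet? b (k : Int)).getD 0) = true := by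
  by_cases hp : ((PySem.List.pyGet? a (k : Int)).getD 0 == (PySem.List.pyGet? b (k : Int)).getD 0) = true
  · exact hp
  · exact absurd (List.mem_filter.mpr ⟨List.mem_range.mpr hk, pdiff_of_not_beq a b k hp⟩) h

-- entries of the swapped copy c = (a.set i aj).set j ai
theorem swap_get_other (a : List Int) (i j k : Nat) (x y : Int)
    (hki : k ≠ i) (hkj : k ≠ j) :
    (PySem.List.pyGet? ((a.set i x).set j y) (k : Int)).getD 0
      = (PySem.List.pyGet? a (k : Int)).getD 0 := by
  simp [PySem.List.pyGet?_natCast, hki.symm, hkj.symm]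

theorem swap_get_i (a : List Int) (i j : Nat) (x y : Int) (hij : i ≠ j) (hi : i < a.length) :
    (PySem.List.pyGet? ((a.set i x).set j y) (i : Int)).getD 0 = x := by
  simp [hij.symm, hi]

theorem swap_get_j (a : List Int) (i j : Nat) (x y : Int) (hj : j < a.length) :
    (PySem.List.pyGet? ((a.set i x).set j y) (j : Int)).getD 0 = y := by
  simp [hj]

-- all over range: helpers for Bool-valued equalities
theorem all_range_true (n : Nat) (f : Nat → Bool) (h : ∀ k, k < n → f k = true) :
    (List.range n).all f = true :=
  List.all_eq_true.mpr (fun k hk => h k (List.mem_range.mp hk))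

theorem all_range_false (n : Nat) (f : Nat → Bool) (k : Nat) (hk : k < n) (hf : f k = false) :
    (List.range n).all f = false := by
  cases h : (List.range n).all f with
  | false => rfl
  | true =>
    have := List.all_eq_true.mp h k (List.mem_range.mpr hk)
    rw [hf] at this
    exact absurd this (by simp)

-- B when there is no difference
theorem alt_nil (a b : List Int)
    (hE : (List.range a.length).filter (pdiff a b) = []) : solution_alt a b = true := by
  have hf : firstMis a b a.length 0 = a.length := by rw [firstMis_spec, rest_zero, hE]
  simp only [solution_alt]
  rw [hf, if_pos rfl]

-- B when there is at least one difference: first/last scans deliver head and last of the list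
theorem alt_cons (a b : List Int) (i0 : Nat) (t : List Nat)
    (hE : (List.range a.length).filter (pdiff a b) = i0 :: t) :
    solution_alt a b =
      ((List.range a.length).all (fun k =>
        ((PySem.List.pyGet? ((a.set i0
            ((PySem.List.pyGet? a ((((i0 :: t).getLast?).getD 0 : Nat) : Int)).getD 0)).set
            (((i0 :: t).getLast?).getD 0)
            ((PySem.List.pyGet? a (i0 : Int)).getD 0)) (k : Int)).getD 0
          == (PySem.List.pyGet? b (k : Int)).getD 0))) := by
  have hi0 : i0 < a.length := L_mem_lt a b i0 (by rw [hE]; exact List.mem_cons_self ..)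
  have hf : firstMis a b a.length 0 = i0 := by rw [firstMis_spec, rest_zero, hE]
  have h1 : (a.length - 1) + 1 = a.length := by omega
  have hl : lastMis a b (a.length - 1) = (((i0 :: t).getLast?).getD 0) := by
    rw [lastMis_spec, h1, hE]
  simp only [solution_alt]
  rw [hf, if_neg (by omega : ¬ i0 = a.length), hl]

-- exactly one difference: B returns false
theorem alt_one (a b : List Int) (i0 : Nat)
    (hE : (List.range a.length).filter (pdiff a b) = [i0]) : solution_alt a b = false := by
  have hi0 : i0 < a.length := L_mem_lt a b i0 (by rw [hE]; exact List.mem_cons_self ..)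
  have hd : pdiff a b i0 = true := L_mem_diff a b i0 (by rw [hE]; exact List.mem_cons_self ..)
  rw [alt_cons a b i0 [] hE]
  refine all_range_false _ _ i0 hi0 ?_
  simp only [List.getLast?_singleton, Option.getD_some]
  rw [swap_get_j a i0 i0 _ _ hi0]
  exact beq_false_of_pdiff a b i0 hd

-- exactly two differences: B returns the cross check
theorem alt_two (a b : List Int) (i0 j0 : Nat)
    (hE : (List.range a.length).filter (pdiff a b) = [i0, j0]) :
    solution_alt a b = cross a b i0 j0 := by
  have hi0 : i0 < a.length := L_mem_lt a b i0 (by rw [hE]; simp)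
  have hj0 : j0 < a.length := L_mem_lt a b j0 (by rw [hE]; simp)
  have hij : i0 < j0 := by
    have hp := L_pairwise a b
    rw [hE] at hp
    exact (List.pairwise_cons.mp hp).1 j0 (by simp)
  rw [alt_cons a b i0 [j0] hE]
  simp only [List.getLast?_cons_cons, List.getLast?_singleton, Option.getD_some]
  by_cases h1 : ((PySem.List.pyGet? a (i0 : Int)).getD 0 == (PySem.List.pyGet? b (j0 : Int)).getD 0) = true
  · by_cases h2 : ((PySem.List.pyGet? a (j0 : Int)).getD 0 == (PySem.List.pyGet? b (i0 : Int)).getD 0) = true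
    · rw [show cross a b i0 j0 = true by unfold cross; rw [h1, h2]; rfl]
      refine all_range_true _ _ (fun k hk => ?_)
      by_cases hki : k = i0
      · subst hki
        rw [swap_get_i a k j0 _ _ (by omega) hi0]
        exact h2
      · by_cases hkj : k = j0
        · subst hkj
          rw [swap_get_j a i0 k _ _ hj0]
          exact h1
        · rw [swap_get_other a i0 j0 k _ _ hki hkj]
          exact not_mem_L a b k hk (by rw [hE]; simp [hki, hkj])
    · have h2' : ((PySem.List.pyGet? a (j0 : Int)).getD 0 == (PySem.List.pyGet? b (i0 : Int)).getD 0) = false := by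
        cases hb : ((PySem.List.pyGet? a (j0 : Int)).getD 0 == (PySem.List.pyGet? b (i0 : Int)).getD 0) with
        | false => rfl
        | true => exact absurd hb h2
      rw [show cross a b i0 j0 = false by unfold cross; rw [h2', Bool.and_false]]
      refine all_range_false _ _ i0 hi0 ?_
      rw [swap_get_i a i0 j0 _ _ (by omega) hi0]
      exact h2'
  · have h1' : ((PySem.List.pyGet? a (i0 : Int)).getD 0 == (PySem.List.pyGet? b (j0 : Int)).getD 0) = false := by
      cases hb : ((PySem.List.pyGet? a (i0 : Int)).getD 0 == (PySem.List.pyGet? b (j0 : Int)).getD 0) with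
      | false => rfl
      | true => exact absurd hb h1
    rw [show cross a b i0 j0 = false by unfold cross; rw [h1', Bool.false_and]]
    refine all_range_false _ _ j0 hj0 ?_
    rw [swap_get_j a i0 j0 _ _ hj0]
    exact h1'

-- three or more differences: B returns false
theorem alt_many (a b : List Int) (i0 j1 j2 : Nat) (t : List Nat)
    (hE : (List.range a.length).filter (pdiff a b) = i0 :: j1 :: j2 :: t) :
    solution_alt a b = false := by
  have hj1 : j1 < a.length := L_mem_lt a b j1 (by rw [hE]; simp)
  have hd1 : pdiff a b j1 = true := L_mem_diff a b j1 (by rw [hE]; simp)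
  have hp := L_pairwise a b
  rw [hE] at hp
  have hp1 := List.pairwise_cons.mp hp
  have hp2 := List.pairwise_cons.mp hp1.2
  have hij : i0 < j1 := hp1.1 j1 (by simp)
  -- the last element is in j2 :: t, hence greater than j1
  obtain ⟨x, hx⟩ : ∃ x, (j2 :: t).getLast? = some x := by
    cases h : (j2 :: t).getLast? with
    | none => exact absurd (List.getLast?_eq_none_iff.mp h) (by simp)
    | some x => exact ⟨x, rfl⟩
  have hxmem : x ∈ j2 :: t := List.mem_of_getLast? hx
  have hj1x : j1 < x := hp2.1 x hxmem
  rw [alt_cons a b i0 (j1 :: j2 :: t) hE]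
  refine all_range_false _ _ j1 hj1 ?_
  rw [List.getLast?_cons_cons, List.getLast?_cons_cons, hx, Option.getD_some]
  rw [swap_get_other a i0 x j1 _ _ (by omega) (by omega)]
  exact beq_false_of_pdiff a b j1 hd1

theorem pdiff_cons_succ (x y : Int) (a b : List Int) (i : Nat) :
    pdiff (x :: a) (y :: b) (i + 1) = pdiff a b i := by
  unfold pdiff
  have hx : ((i + 1 : Nat) : Int) = (i : Int) + 1 := by push_cast; ring
  rw [hx, PySem.List.pyGet?_cons_succ, PySem.List.pyGet?_cons_succ]

theorem pdiff_cons_zero (x y : Int) (a b : List Int) :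
    pdiff (x :: a) (y :: b) 0 = (x != y) := by
  unfold pdiff
  rw [show ((0 : Nat) : Int) = 0 from rfl, PySem.List.pyGet?_zero_cons, PySem.List.pyGet?_zero_cons]
  rfl

-- bridge: under Pre_, the zip-based mismatch count equals the number of differing indices
theorem zipcount (a : List Int) : ∀ (b : List Int), a.length ≤ b.length →
    (a.zip b).countP (fun p => p.1 != p.2) = ((List.range a.length).filter (pdiff a b)).length := by
  induction a with
  | nil => intro b _; simp
  | cons x a' ih =>
    intro b h
    cases b with
    | nil => simp at h
    | cons y b' =>
      have h' : a'.length ≤ b'.length := by simpa using h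
      rw [List.zip_cons_cons, List.countP_cons,
        show (x :: a').length = a'.length + 1 from rfl, List.range_succ_eq_map,
        List.filter_cons, pdiff_cons_zero x y a' b']
      have hmap : (List.range a'.length).filter ((pdiff (x :: a') (y :: b')) ∘ Nat.succ)
          = (List.range a'.length).filter (pdiff a' b') := by
        apply List.filter_congr
        intro i _
        exact pdiff_cons_succ x y a' b' i
      cases hxy : (x != y) with
      | true => simp [List.filter_map, hmap, ih b' h']
      | false => simp [List.filter_map, hmap, ih b' h']

theorem D_iff (a b : List Int) (hpre : a.length ≤ b.length) :
    D_solution a b ↔ ((List.range a.length).filter (pdiff a b)).length = 1 := by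
  unfold D_solution
  rw [zipcount a b hpre]

theorem solution_spec' (a b : List Int) (hpre : a.length ≤ b.length) (hD : ¬ D_solution a b) :
    solution a b = solution_alt a b := by
  rw [solution_eq_classify]
  cases hE : (List.range a.length).filter (pdiff a b) with
  | nil => rw [alt_nil a b hE]; rfl
  | cons i0 t =>
    cases t with
    | nil => exact absurd ((D_iff a b hpre).mpr (by rw [hE]; rfl)) hD
    | cons j1 t' =>
      cases t' with
      | nil => rw [alt_two a b i0 j1 hE]; rfl
      | cons j2 t'' => rw [alt_many a b i0 j1 j2 t'' hE]; rfl

-- ===== VERDICT (by name: the statements are the Claim_ definitions above) =====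
theorem solution_spec : Claim_unchanged_solution := by
  intro a b _hdom hpre
  unfold Spec_solution
  intro h
  exact solution_spec' a b hpre h

theorem solution_changed : Claim_changed_solution := by
  unfold Claim_changed_solution
  refine ⟨by decide, by decide, by decide, ?_, ?_, by decide⟩
  · show solution [1, 2] [1, 3] = true
    rw [solution_eq_classify]
    decide
  · show solution_alt [1, 2] [1, 3] = false
    exact alt_one [1, 2] [1, 3] 1 (by decide)

theorem solution_tight : Claim_exact_solution := by
  intro a b _hdom hpre hD
  obtain ⟨i0, hE⟩ := List.length_eq_one_iff.mp ((D_iff a b hpre).mp hD)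
  rw [solution_eq_classify, hE, alt_one a b i0 hE]
  simp [classify]
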